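-- pv_equiv track=rewrite | github.com/kiwidamien/katas | 2022/day07_puzzle.py | visible_line
-- ===== SOURCE A (Python) =====
-- from typing import List, Tuple
--
-- def visible_line(nums: List[int]) -> List[int]:
--     current_floor = -1
--     visible = []
--     for index, first in enumerate(nums):
--         if first > current_floor:
--             visible.append(index)
--         current_floor = max(first, current_floor)
--     return visible
-- ===== SOURCE B (Python) =====
-- def visible_line(nums):
--     # two passes: build a prefix-maxima table, then filter the indices
--     prefix = [-1]
--     for x in nums:
--         prefix.append(max(prefix[-1], x))
--     return [i for i, x in enumerate(nums) if x > prefix[i]]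
-- ===== Notes on version B (the rewrite author's own statement) =====
-- stated objective: alternative
-- what changed: Replaces the single interleaved running-max-and-append loop by two differently shaped passes: first build a prefix-maxima table seeded with -1, then filter the indices whose value exceeds the table entry.
import Mathlib
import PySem

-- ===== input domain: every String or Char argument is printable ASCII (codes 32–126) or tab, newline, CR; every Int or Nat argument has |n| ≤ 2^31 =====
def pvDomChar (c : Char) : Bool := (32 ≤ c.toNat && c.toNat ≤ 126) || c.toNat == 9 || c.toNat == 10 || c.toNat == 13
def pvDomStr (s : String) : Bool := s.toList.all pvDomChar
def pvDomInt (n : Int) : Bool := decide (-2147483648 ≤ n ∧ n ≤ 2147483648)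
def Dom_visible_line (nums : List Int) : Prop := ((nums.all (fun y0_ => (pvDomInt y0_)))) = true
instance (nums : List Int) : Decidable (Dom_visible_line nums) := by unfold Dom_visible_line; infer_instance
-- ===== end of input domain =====

-- B replaces A's single running-max loop by a prefix-maxima table pass followed by a filtering pass; same cost, different decomposition.

-- ===== PORT A =====
-- state (current_floor, visible); loop over enumerate(nums)
def visible_line (nums : List Int) : List Int :=
  ((PySem.List.enumerate nums 0).foldl
    (fun (st : Int × List Int) (p : Int × Int) =>
      (max p.2 st.1, if p.2 > st.1 then st.2 ++ [p.1] else st.2))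
    ((-1 : Int), ([] : List Int))).2

-- ===== PORT B =====
-- prefix = [-1]; for x in nums: prefix.append(max(prefix[-1], x))
def prefixMax : Int → List Int → List Int
  | m, [] => [m]
  | m, x :: xs => m :: prefixMax (max m x) xs

-- [i for i, x in enumerate(nums) if x > prefix[i]]
def visible_line_alt (nums : List Int) : List Int :=
  ((PySem.List.enumerate nums 0).zip (prefixMax (-1) nums)).filterMap
    (fun p => if p.1.2 > p.2 then some p.1.1 else none)

-- ===== PRECONDITION & SPEC =====
def Spec_visible_line (nums : List Int) (out : List Int) : Prop := out = visible_line_alt nums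
instance (nums : List Int) (out : List Int) : Decidable (Spec_visible_line nums out) := by unfold Spec_visible_line; infer_instance

-- ===== CLAIM (what is proved, stated in full; the proofs are below) =====
def Claim_equal_visible_line : Prop := ∀ (nums : List Int), Dom_visible_line nums → Spec_visible_line nums (visible_line nums)

-- ===== LEMMAS AND PROOFS =====
lemma visible_key (xs : List Int) : ∀ (s m : Int) (acc : List Int),
    ((PySem.List.enumerate xs s).foldl
      (fun (st : Int × List Int) (p : Int × Int) =>
        (max p.2 st.1, if p.2 > st.1 then st.2 ++ [p.1] else st.2))
      (m, acc)).2
    = acc ++ ((PySem.List.enumerate xs s).zip (prefixMax m xs)).filterMap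
        (fun p => if p.1.2 > p.2 then some p.1.1 else none) := by
  induction xs with
  | nil => simp [PySem.List.enumerate_nil, prefixMax]
  | cons x xs ih =>
    intro s m acc
    simp only [PySem.List.enumerate_cons, prefixMax, List.zip_cons_cons,
      List.filterMap_cons, List.foldl_cons]
    rw [ih]
    by_cases h : x > m
    · simp [h, max_comm]
    · simp [h, max_comm]

-- ===== VERDICT (by name: the statement is the Claim_ definition above) =====
theorem visible_line_spec : Claim_equal_visible_line := by
  intro nums _
  show visible_line nums = visible_line_alt nums
  simp [visible_line, visible_line_alt, visible_key]
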